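-- pv_equiv track=rewrite | github.com/takasboyfriend/oneokrock | 6.2.py | func6210
-- ===== SOURCE A (Python) =====
-- def func6210(set1, set2):
--     res1=[]
--     res2=[]
--     lst=set(list(set1)+list(set2))
--     for i in lst :
--         if (i in set1 and i not in set2) or (i not in set1 and i in set2):
--             res1.append(i)
--         if i in set1 and i in set2:
--             res2.append(i)
--     return (tuple(sorted(res1)),tuple(sorted(res2,reverse=True)))
--     pass
-- ===== SOURCE B (Python) =====
-- def func6210(set1, set2):
--     a = sorted(set(set1))
--     b = sorted(set(set2))
--     sym = []
--     inter = []
--     i = j = 0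
--     while i < len(a) and j < len(b):
--         if a[i] < b[j]:
--             sym.append(a[i]); i += 1
--         elif b[j] < a[i]:
--             sym.append(b[j]); j += 1
--         else:
--             inter.append(a[i]); i += 1; j += 1
--     sym.extend(a[i:])
--     sym.extend(b[j:])
--     return (tuple(sym), tuple(inter[::-1]))
-- ===== Notes on version B (the rewrite author's own statement) =====
-- stated objective: alternative
-- what changed: Replaces the membership-classification loop over the union with a sort-then-two-pointer merge of the two deduplicated sorted lists, which emits the symmetric difference already in ascending order and the intersection in ascending order (reversed at the end) with no membership tests at all.
import Mathlib
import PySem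

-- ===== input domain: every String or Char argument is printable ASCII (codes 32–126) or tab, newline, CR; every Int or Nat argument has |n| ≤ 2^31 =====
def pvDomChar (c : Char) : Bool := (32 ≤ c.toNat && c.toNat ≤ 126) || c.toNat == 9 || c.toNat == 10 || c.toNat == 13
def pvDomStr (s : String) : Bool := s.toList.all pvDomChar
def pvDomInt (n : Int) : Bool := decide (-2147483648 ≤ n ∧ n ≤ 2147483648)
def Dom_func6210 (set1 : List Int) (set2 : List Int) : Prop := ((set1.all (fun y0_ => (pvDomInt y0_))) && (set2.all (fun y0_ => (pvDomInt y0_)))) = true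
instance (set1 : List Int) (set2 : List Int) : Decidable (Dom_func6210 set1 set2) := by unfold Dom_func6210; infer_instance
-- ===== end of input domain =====

-- B replaces A's membership-classification loop over the union with a sort-then-two-pointer
-- merge of the deduplicated sorted inputs (alternative algorithm, no membership tests).


-- ===== PORT A =====
-- A iterates over set(set1+set2); the iteration order cannot affect the result because both
-- result lists are sorted before returning, so folding over Set.ofList's order is exact.
def func6210 (set1 : List Int) (set2 : List Int) : List Int × List Int :=
  let lst : PySem.Set Int := PySem.Set.ofList (set1 ++ set2)
  let res : List Int × List Int := lst.foldl (fun r i =>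
    let r1 := if (set1.contains i && !set2.contains i) || (!set1.contains i && set2.contains i)
              then r.1 ++ [i] else r.1
    let r2 := if set1.contains i && set2.contains i then r.2 ++ [i] else r.2
    (r1, r2)) ([], [])
  (PySem.List.sorted res.1 (fun x => x) false, PySem.List.sorted res.2 (fun x => x) true)

-- ===== PORT B =====
-- B's while-loop with indices i, j over the two sorted arrays becomes structural recursion on
-- the two list suffixes; sym.extend(a[i:]) / sym.extend(b[j:]) are the base cases.
def pvMerge2 : List Int → List Int → List Int × List Int
  | [], b => (b, [])
  | a, [] => (a, [])
  | x :: a, y :: b =>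
    if x < y then
      let r := pvMerge2 a (y :: b); (x :: r.1, r.2)
    else if y < x then
      let r := pvMerge2 (x :: a) b; (y :: r.1, r.2)
    else
      let r := pvMerge2 a b; (r.1, x :: r.2)
termination_by a b => a.length + b.length
decreasing_by all_goals simp <;> omega

def func6210_alt (set1 : List Int) (set2 : List Int) : List Int × List Int :=
  let a := PySem.List.sorted (PySem.Set.ofList set1) (fun x => x) false
  let b := PySem.List.sorted (PySem.Set.ofList set2) (fun x => x) false
  let r := pvMerge2 a b
  (r.1, r.2.reverse)

-- ===== PRECONDITION & SPEC =====
def Spec_func6210 (set1 : List Int) (set2 : List Int) (out : List Int × List Int) : Prop := out = func6210_alt set1 set2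
instance (set1 : List Int) (set2 : List Int) (out : List Int × List Int) : Decidable (Spec_func6210 set1 set2 out) := by unfold Spec_func6210; infer_instance

-- ===== CLAIM =====
def Claim_equal_func6210 : Prop := ∀ (set1 : List Int) (set2 : List Int), Dom_func6210 set1 set2 → Spec_func6210 set1 set2 (func6210 set1 set2)

-- ===== LEMMAS AND PROOFS =====

-- A's loop with a pair accumulator is a pair of filters.
theorem pv_pair_foldl (q1 q2 : Int → Bool) (l a b : List Int) :
    l.foldl (fun (r : List Int × List Int) i =>
      (if q1 i then r.1 ++ [i] else r.1, if q2 i then r.2 ++ [i] else r.2)) (a, b)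
    = (a ++ l.filter q1, b ++ l.filter q2) := by
  induction l generalizing a b with
  | nil => simp
  | cons x t ih =>
    simp only [List.foldl_cons, List.filter_cons, ih]
    split_ifs <;> simp

-- Unfolding equations for pvMerge2.
theorem pvMerge2_nil_left (b : List Int) : pvMerge2 [] b = (b, []) := by
  cases b <;> simp [pvMerge2]

theorem pvMerge2_cons_nil (x : Int) (a : List Int) : pvMerge2 (x :: a) [] = (x :: a, []) := by
  simp [pvMerge2]

theorem pvMerge2_lt (x y : Int) (a b : List Int) (h : x < y) :
    pvMerge2 (x :: a) (y :: b) = (x :: (pvMerge2 a (y :: b)).1, (pvMerge2 a (y :: b)).2) := by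
  simp [pvMerge2, h]

theorem pvMerge2_gt (x y : Int) (a b : List Int) (h1 : ¬ x < y) (h2 : y < x) :
    pvMerge2 (x :: a) (y :: b) = (y :: (pvMerge2 (x :: a) b).1, (pvMerge2 (x :: a) b).2) := by
  simp [pvMerge2, h1, h2]

theorem pvMerge2_eq (x y : Int) (a b : List Int) (h1 : ¬ x < y) (h2 : ¬ y < x) :
    pvMerge2 (x :: a) (y :: b) = ((pvMerge2 a b).1, x :: (pvMerge2 a b).2) := by
  simp [pvMerge2, h1, h2]

-- The merge of two strictly increasing lists: both outputs are strictly increasing, the first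
-- is exactly the symmetric difference and the second exactly the intersection (as sets).
theorem pvMerge2_spec (a b : List Int)
    (ha : a.Pairwise (· < ·)) (hb : b.Pairwise (· < ·)) :
    ((pvMerge2 a b).1.Pairwise (· < ·)
      ∧ ∀ x, x ∈ (pvMerge2 a b).1 ↔ ((x ∈ a ∧ x ∉ b) ∨ (x ∉ a ∧ x ∈ b)))
    ∧ ((pvMerge2 a b).2.Pairwise (· < ·)
      ∧ ∀ x, x ∈ (pvMerge2 a b).2 ↔ (x ∈ a ∧ x ∈ b)) := by
  induction a, b using pvMerge2.induct with
  | case1 b =>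
    rw [pvMerge2_nil_left]; dsimp only
    exact ⟨⟨hb, by simp⟩, by simp, by simp⟩
  | case2 a h =>
    cases a with
    | nil => simp at h
    | cons x a =>
      rw [pvMerge2_cons_nil]; dsimp only
      exact ⟨⟨ha, by simp⟩, by simp, by simp⟩
  | case3 x a y b hxy ih =>
    have ha' := List.pairwise_cons.mp ha
    have hb' := List.pairwise_cons.mp hb
    obtain ⟨⟨hs1, hm1⟩, hs2, hm2⟩ := ih ha'.2 hb
    rw [pvMerge2_lt x y a b hxy]; dsimp only
    have hxnb : x ∉ y :: b := by
      simp only [List.mem_cons]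
      push_neg
      exact ⟨by omega, fun h => by have := hb'.1 x h; omega⟩
    refine ⟨⟨?_, ?_⟩, hs2, ?_⟩
    · refine List.pairwise_cons.mpr ⟨?_, hs1⟩
      intro z hz
      rcases (hm1 z).mp hz with ⟨hz1, _⟩ | ⟨_, hz2⟩
      · exact ha'.1 z hz1
      · rcases List.mem_cons.mp hz2 with rfl | h
        · exact hxy
        · exact lt_trans hxy (hb'.1 z h)
    · intro z
      by_cases hzx : z = x
      · subst hzx
        simp only [List.mem_cons, hm1]
        simp only [List.mem_cons] at hxnb
        tauto
      · simp only [List.mem_cons, hm1]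
        tauto
    · intro z
      by_cases hzx : z = x
      · subst hzx
        simp only [List.mem_cons, hm2]
        simp only [List.mem_cons] at hxnb
        tauto
      · simp only [List.mem_cons, hm2]
        tauto
  | case4 x a y b hxy hyx ih =>
    have ha' := List.pairwise_cons.mp ha
    have hb' := List.pairwise_cons.mp hb
    obtain ⟨⟨hs1, hm1⟩, hs2, hm2⟩ := ih ha hb'.2
    rw [pvMerge2_gt x y a b hxy hyx]; dsimp only
    have hyna : y ∉ x :: a := by
      simp only [List.mem_cons]
      push_neg
      exact ⟨by omega, fun h => by have := ha'.1 y h; omega⟩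
    refine ⟨⟨?_, ?_⟩, hs2, ?_⟩
    · refine List.pairwise_cons.mpr ⟨?_, hs1⟩
      intro z hz
      rcases (hm1 z).mp hz with ⟨hz1, _⟩ | ⟨_, hz2⟩
      · rcases List.mem_cons.mp hz1 with rfl | h
        · exact hyx
        · exact lt_trans hyx (ha'.1 z h)
      · exact hb'.1 z hz2
    · intro z
      by_cases hzy : z = y
      · subst hzy
        simp only [List.mem_cons, hm1]
        simp only [List.mem_cons] at hyna
        tauto
      · simp only [List.mem_cons, hm1]
        tauto
    · intro z
      by_cases hzy : z = y
      · subst hzy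
        simp only [List.mem_cons, hm2]
        simp only [List.mem_cons] at hyna
        tauto
      · simp only [List.mem_cons, hm2]
        tauto
  | case5 x a y b hxy hyx ih =>
    have hxy' : x = y := by omega
    subst hxy'
    have ha' := List.pairwise_cons.mp ha
    have hb' := List.pairwise_cons.mp hb
    obtain ⟨⟨hs1, hm1⟩, hs2, hm2⟩ := ih ha'.2 hb'.2
    rw [pvMerge2_eq x x a b hxy hyx]; dsimp only
    have hxna : x ∉ a := fun h => by have := ha'.1 x h; omega
    have hxnb : x ∉ b := fun h => by have := hb'.1 x h; omega
    refine ⟨⟨hs1, ?_⟩, ?_, ?_⟩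
    · intro z
      by_cases hzx : z = x
      · subst hzx
        simp only [List.mem_cons, hm1]
        tauto
      · simp only [List.mem_cons, hm1]
        tauto
    · refine List.pairwise_cons.mpr ⟨?_, hs2⟩
      intro z hz
      exact ha'.1 z ((hm2 z).mp hz).1
    · intro z
      by_cases hzx : z = x
      · subst hzx
        simp only [List.mem_cons, hm2]
        tauto
      · simp only [List.mem_cons, hm2]
        tauto

theorem func6210_eq_alt (set1 set2 : List Int) :
    func6210 set1 set2 = func6210_alt set1 set2 := by
  unfold func6210 func6210_alt
  simp only
  rw [pv_pair_foldl]
  simp only [List.nil_append]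
  set a := PySem.List.sorted (PySem.Set.ofList set1) (fun x => x) false with hadef
  set b := PySem.List.sorted (PySem.Set.ofList set2) (fun x => x) false with hbdef
  have hpa : a.Pairwise (· < ·) := PySem.List.sorted_ofList_pairwise_lt set1
  have hpb : b.Pairwise (· < ·) := PySem.List.sorted_ofList_pairwise_lt set2
  have hma : ∀ x : Int, x ∈ a ↔ x ∈ set1 := by
    intro x; rw [hadef, PySem.List.mem_sorted, PySem.Set.mem_ofList]
  have hmb : ∀ x : Int, x ∈ b ↔ x ∈ set2 := by
    intro x; rw [hbdef, PySem.List.mem_sorted, PySem.Set.mem_ofList]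
  obtain ⟨⟨hs1, hm1⟩, hs2, hm2⟩ := pvMerge2_spec a b hpa hpb
  have hndU : (PySem.Set.ofList (set1 ++ set2) : List Int).Nodup :=
    PySem.Set.nodup_ofList _
  refine Prod.ext_iff.mpr ⟨?_, ?_⟩
  · -- symmetric difference component
    apply PySem.List.sorted_eq_of_perm_of_pairwise_lt
    · apply (List.perm_ext_iff_of_nodup (hs1.imp (fun h => ne_of_lt h)) (hndU.filter _)).mpr
      intro x
      simp only [hm1, hma, hmb, List.mem_filter, PySem.Set.mem_ofList, List.mem_append,
        Bool.or_eq_true, Bool.and_eq_true, Bool.not_eq_true', List.contains_eq_mem,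
        decide_eq_true_eq, decide_eq_false_iff_not]
      tauto
    · exact hs1
  · -- intersection component
    apply PySem.List.sorted_rev_eq_of_perm_of_pairwise_gt
    · apply (List.perm_ext_iff_of_nodup
        ((List.nodup_reverse).mpr (hs2.imp (fun h => ne_of_lt h))) (hndU.filter _)).mpr
      intro x
      simp only [List.mem_reverse, hm2, hma, hmb, List.mem_filter, PySem.Set.mem_ofList,
        List.mem_append, Bool.and_eq_true, List.contains_eq_mem, decide_eq_true_eq]
      tauto
    · exact (List.pairwise_reverse).mpr (hs2.imp (fun {x y} h => h))

-- ===== VERDICT =====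
theorem func6210_spec : Claim_equal_func6210 := by
  intro set1 set2 _
  unfold Spec_func6210
  exact func6210_eq_alt set1 set2
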